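-- pv_equiv track=rewrite | github.com/zoffixznet/project-euler | project-euler/539/euler_539_v1.py | P_list
-- ===== SOURCE A (Python) =====
-- def P_list(my_int, is_left):
--     if my_int == 1:
--         return 0
--     return ((my_int & 0x1) | is_left |
--             (
--                 (
--                     P_list((my_int >> 1), (is_left ^ 0x1))
--                 ) << 1
--             ))
-- ===== SOURCE B (Python) =====
-- def P_list(my_int, is_left):
--     # count the levels (bit_length - 1) first
--     m = 0
--     t = my_int
--     while t != 1:
--         t >>= 1
--         m += 1
--     # build the result top-down: level k contributes ((my_int >> k) & 1) | L_k,
--     # where L_k alternates; the deepest level (k = m-1) uses is_left ^ ((m-1) & 1)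
--     result = 0
--     L = is_left ^ ((m - 1) & 1)
--     k = m - 1
--     while k >= 0:
--         result = ((my_int >> k) & 1) | L | (result << 1)
--         L ^= 1
--         k -= 1
--     return result
-- ===== Notes on version B (the rewrite author's own statement) =====
-- stated objective: alternative
-- what changed: Replaces A's top-level recursion (which peels the low bit and assembles nested <<1 shifts on the way back) by an explicit two-loop iteration: first a loop computes the level count m (bit-length minus one), then a descending index loop k=m-1..0 builds the result top-down with a shift-and-or accumulator and an explicitly toggled parity bit; same O(log n) work, no recursion.
import Mathlib
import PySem

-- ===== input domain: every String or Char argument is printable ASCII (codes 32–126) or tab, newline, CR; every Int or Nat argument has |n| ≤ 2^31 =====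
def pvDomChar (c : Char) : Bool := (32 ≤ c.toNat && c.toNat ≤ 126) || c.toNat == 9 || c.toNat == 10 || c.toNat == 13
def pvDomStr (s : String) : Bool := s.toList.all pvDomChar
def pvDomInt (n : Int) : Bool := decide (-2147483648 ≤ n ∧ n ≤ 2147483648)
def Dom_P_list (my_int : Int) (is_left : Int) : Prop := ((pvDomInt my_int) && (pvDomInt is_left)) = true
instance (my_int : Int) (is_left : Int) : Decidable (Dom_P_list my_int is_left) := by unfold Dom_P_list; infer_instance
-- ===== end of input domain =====

-- B replaces A's recursion by an explicit two-loop iteration (level count first, then a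
-- descending top-down shift-and-or accumulator loop); same cost, different decomposition
-- (objective: alternative).


-- ===== PORT A =====
-- A's recursion halves my_int until it is 1; it does not terminate for my_int ≤ 0
-- (Python raises RecursionError there — excluded by Pre_), so the port carries a fuel
-- guard that only makes the same computation total; fuel my_int.toNat + 1 is never
-- exhausted on inputs satisfying Pre_.  & | ^ are PySem.Int.band/bor/bxor (Python-exact),
-- << >> are core's <<< >>> by a Nat count (Python-exact, see PYSEM.md).
def P_list_go (fuel : Nat) (my_int : Int) (is_left : Int) : Int :=
  match fuel with
  | 0 => 0
  | f + 1 =>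
    if my_int == 1 then 0
    else PySem.Int.bor (PySem.Int.bor (PySem.Int.band my_int 1) is_left)
          ((P_list_go f (my_int >>> (1 : Nat)) (PySem.Int.bxor is_left 1)) <<< (1 : Nat))

def P_list (my_int : Int) (is_left : Int) : Int :=
  P_list_go (my_int.toNat + 1) my_int is_left

-- ===== PORT B =====
-- first loop of Source B: 'while t != 1: t >>= 1; m += 1' (same fuel guard as port A;
-- the loop runs at most bit-length(my_int) times, so the fuel is never exhausted on Pre_)
def P_list_alt_len (fuel : Nat) (t : Int) (m : Int) : Int :=
  match fuel with
  | 0 => m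
  | f + 1 => if t == 1 then m else P_list_alt_len f (t >>> (1 : Nat)) (m + 1)

-- second loop of Source B: 'while k >= 0: result = ((my_int >> k) & 1) | L | (result << 1);
-- L ^= 1; k -= 1'.  Inside the loop k ≥ 0, so 'my_int >> k' is exactly 'my_int >>> k.toNat'.
def P_list_alt_loop (fuel : Nat) (n : Int) (k : Int) (L : Int) (result : Int) : Int :=
  match fuel with
  | 0 => result
  | f + 1 =>
    if 0 ≤ k then
      P_list_alt_loop f n (k - 1) (PySem.Int.bxor L 1)
        (PySem.Int.bor (PySem.Int.bor (PySem.Int.band (n >>> k.toNat) 1) L) (result <<< (1 : Nat)))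
    else result

def P_list_alt (my_int : Int) (is_left : Int) : Int :=
  let m := P_list_alt_len (my_int.toNat + 1) my_int 0
  P_list_alt_loop (my_int.toNat + 1) my_int (m - 1)
    (PySem.Int.bxor is_left (PySem.Int.band (m - 1) 1)) 0

-- ===== PRECONDITION & SPEC =====
-- Pre_ excludes my_int ≤ 0, on which Python A never returns (unbounded recursion,
-- RecursionError) and B's first while-loop never exits.
def Pre_P_list (my_int : Int) (is_left : Int) : Prop := 1 ≤ my_int
instance (my_int : Int) (is_left : Int) : Decidable (Pre_P_list my_int is_left) := by unfold Pre_P_list; infer_instance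
def pvWitness_P_list : Int × Int := (6, 1)

def Spec_P_list (my_int : Int) (is_left : Int) (out : Int) : Prop := out = P_list_alt my_int is_left
instance (my_int : Int) (is_left : Int) (out : Int) : Decidable (Spec_P_list my_int is_left out) := by unfold Spec_P_list; infer_instance

-- ===== CLAIM (what is proved, stated in full; the proofs are below) =====
def Claim_equal_P_list : Prop := ∀ (my_int : Int) (is_left : Int), Dom_P_list my_int is_left → Pre_P_list my_int is_left → Spec_P_list my_int is_left (P_list my_int is_left)

-- ===== LEMMAS AND PROOFS =====

-- toggling the low bit twice is the identity
theorem pv_tog (L : Int) : PySem.Int.bxor (PySem.Int.bxor L 1) 1 = L := by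
  unfold PySem.Int.bxor
  split_ifs <;> simp_all <;> omega

theorem pv_sr_zero (n : Int) : n >>> (0 : Nat) = n := by
  simp [Int.shiftRight_eq_div_pow]

theorem pv_sr_succ (n : Int) (j : Nat) : (n >>> (1 : Nat)) >>> j = n >>> (j + 1) := by
  simp only [Int.shiftRight_eq_div_pow]
  rw [Int.ediv_ediv_of_nonneg (by positivity)]
  norm_num [pow_succ]
  ring_nf

theorem pv_toNat_shift (n : Int) : (n >>> (1 : Nat)).toNat = n.toNat / 2 := by
  have h : n >>> (1 : Nat) = n / 2 := by
    simp [Int.shiftRight_eq_div_pow]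
  rw [h]
  omega

-- proof-side level count (= bit-length minus one, clipped at 0)
def pvLev (t : Nat) : Nat :=
  if h : 2 ≤ t then pvLev (t / 2) + 1 else 0
decreasing_by omega

theorem pvLev_step (t : Nat) (h : 2 ≤ t) : pvLev t = pvLev (t / 2) + 1 := by
  rw [pvLev]
  simp [h]

theorem pvLev_base (t : Nat) (h : t < 2) : pvLev t = 0 := by
  have h2 : ¬ 2 ≤ t := by omega
  rw [pvLev]
  simp [h2]

theorem pvLev_le (t : Nat) : pvLev t ≤ t := by
  induction t using Nat.strong_induction_on with
  | _ t ih =>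
    by_cases h : 2 ≤ t
    · have := ih (t / 2) (by omega)
      rw [pvLev_step t h]
      omega
    · rw [pvLev_base t (by omega)]
      omega

-- proof-side pure version of B's second loop: j = number of remaining iterations
-- (the current index is j - 1)
def Dpure (n : Int) (j : Nat) (L : Int) (r : Int) : Int :=
  match j with
  | 0 => r
  | j' + 1 =>
    Dpure n j' (PySem.Int.bxor L 1)
      (PySem.Int.bor (PySem.Int.bor (PySem.Int.band (n >>> j') 1) L) (r <<< (1 : Nat)))

-- L after j toggles
def Tog (j : Nat) (L : Int) : Int :=
  match j with
  | 0 => L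
  | j' + 1 => Tog j' (PySem.Int.bxor L 1)

-- casting helper: `&1` of a natural number is its parity
theorem pv_band_one_cast (j : Nat) :
    PySem.Int.band ((j : Nat) : Int) 1 = ((j % 2 : Nat) : Int) := by
  have h := PySem.Int.band_natCast j 1
  simpa [Nat.and_one_is_mod] using h

-- B's first loop computes m + (level count of t) (for t ≥ 1, with enough fuel)
theorem pv_len_eq (fuel : Nat) :
    ∀ (t m : Int), 1 ≤ t → t.toNat ≤ fuel →
      P_list_alt_len fuel t m = m + (pvLev t.toNat : Int) := by
  induction fuel with
  | zero => intro t m ht hf; omega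
  | succ f ih =>
    intro t m ht hf
    by_cases h1 : t = 1
    · subst h1
      have h0 : pvLev 1 = 0 := pvLev_base 1 (by norm_num)
      simp [P_list_alt_len, h0]
    · have ht2 : 2 ≤ t := by omega
      have hne : (t == 1) = false := by simp [h1]
      have hsh : (t >>> (1 : Nat)).toNat = t.toNat / 2 := pv_toNat_shift t
      have h1' : 1 ≤ t >>> (1 : Nat) := by
        have h : t >>> (1 : Nat) = t / 2 := by simp [Int.shiftRight_eq_div_pow]
        rw [h]; omega
      have hf' : (t >>> (1 : Nat)).toNat ≤ f := by omega
      simp only [P_list_alt_len, hne, Bool.false_eq_true, if_false]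
      rw [ih _ _ h1' hf', hsh, pvLev_step t.toNat (by omega)]
      push_cast
      ring

-- B's second loop equals Dpure (with enough fuel)
theorem pv_loop_eq (fuel : Nat) :
    ∀ (n k L r : Int), (k + 1).toNat ≤ fuel →
      P_list_alt_loop fuel n k L r = Dpure n (k + 1).toNat L r := by
  induction fuel with
  | zero =>
    intro n k L r hf
    have h0 : (k + 1).toNat = 0 := by omega
    rw [h0]
    simp [P_list_alt_loop, Dpure]
  | succ f ih =>
    intro n k L r hf
    by_cases hk : 0 ≤ k
    · have h1 : (k + 1).toNat = k.toNat + 1 := by omega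
      have h2 : (k - 1 + 1).toNat = k.toNat := by omega
      simp only [P_list_alt_loop, hk, if_true]
      rw [ih _ _ _ _ (by omega), h2, h1]
      simp [Dpure]
    · have h0 : (k + 1).toNat = 0 := by omega
      rw [h0]
      simp [P_list_alt_loop, hk, Dpure]

-- peeling the bottom level out of the top-down loop: running j+1 levels over n equals
-- the level-0 contribution combined with j levels run over n >>> 1
theorem pv_dpure_shift (j : Nat) :
    ∀ (n L r : Int),
      Dpure n (j + 1) L r =
        PySem.Int.bor (PySem.Int.bor (PySem.Int.band n 1) (Tog j L))
          ((Dpure (n >>> (1 : Nat)) j L r) <<< (1 : Nat)) := by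
  induction j with
  | zero =>
    intro n L r
    simp [Dpure, Tog, pv_sr_zero]
  | succ j' ih =>
    intro n L r
    have step : Dpure n (j' + 1 + 1) L r =
        Dpure n (j' + 1) (PySem.Int.bxor L 1)
          (PySem.Int.bor (PySem.Int.bor (PySem.Int.band (n >>> (j' + 1)) 1) L)
            (r <<< (1 : Nat))) := rfl
    rw [step, ih]
    have hsr : (n >>> (1 : Nat)) >>> j' = n >>> (j' + 1) := pv_sr_succ n j'
    have hTog : Tog (j' + 1) L = Tog j' (PySem.Int.bxor L 1) := rfl
    rw [hTog]
    congr 2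
    rw [← hsr]
    rfl

-- after j toggles starting from L ^ (j % 2), the parity cancels
theorem pv_togpar (j : Nat) : ∀ (L : Int), Tog j (PySem.Int.bxor L ((j % 2 : Nat) : Int)) = L := by
  induction j with
  | zero =>
    intro L
    show PySem.Int.bxor L ((0 % 2 : Nat) : Int) = L
    norm_num
  | succ j' ih =>
    intro L
    show Tog j' (PySem.Int.bxor (PySem.Int.bxor L (((j' + 1) % 2 : Nat) : Int)) 1) = L
    have key : PySem.Int.bxor (PySem.Int.bxor L (((j' + 1) % 2 : Nat) : Int)) 1
        = PySem.Int.bxor L ((j' % 2 : Nat) : Int) := by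
      rcases Nat.even_or_odd j' with he | ho
      · have h1 : j' % 2 = 0 := Nat.even_iff.mp he
        have h2 : (j' + 1) % 2 = 1 := by omega
        rw [h1, h2]
        push_cast
        rw [pv_tog]
        exact (PySem.Int.bxor_zero L).symm
      · have h1 : j' % 2 = 1 := Nat.odd_iff.mp ho
        have h2 : (j' + 1) % 2 = 0 := by omega
        rw [h1, h2]
        push_cast
        rw [PySem.Int.bxor_zero]
    rw [key, ih]

-- A's fuelled recursion does not depend on the fuel once it is at least my_int.toNat
theorem pv_fuelA (f1 : Nat) :
    ∀ (f2 : Nat) (n L : Int), 1 ≤ n → n.toNat ≤ f1 → n.toNat ≤ f2 →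
      P_list_go f1 n L = P_list_go f2 n L := by
  induction f1 with
  | zero => intro f2 n L hn h1 _; omega
  | succ f ih =>
    intro f2 n L hn h1 h2
    cases f2 with
    | zero => omega
    | succ f2' =>
      by_cases hone : n = 1
      · simp [P_list_go, hone]
      · have hne : (n == 1) = false := by simp [hone]
        have hn2 : 2 ≤ n := by omega
        have hsh : (n >>> (1 : Nat)).toNat = n.toNat / 2 := pv_toNat_shift n
        have h1' : 1 ≤ n >>> (1 : Nat) := by
          have h : n >>> (1 : Nat) = n / 2 := by simp [Int.shiftRight_eq_div_pow]
          rw [h]; omega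
        simp only [P_list_go, hne, Bool.false_eq_true, if_false]
        rw [ih f2' (n >>> (1 : Nat)) (PySem.Int.bxor L 1) h1' (by omega) (by omega)]

-- the parity prefix fed to the deeper call matches the one of the outer call
theorem pv_parity_match (j'' : Nat) (L : Int) :
    PySem.Int.bxor (PySem.Int.bxor L 1) (PySem.Int.band ((j'' : Int) - 1) 1)
      = PySem.Int.bxor L ((j'' % 2 : Nat) : Int) := by
  cases j'' with
  | zero =>
    have hband : PySem.Int.band ((0 : Int) - 1) 1 = 1 := by decide
    simp only [Nat.cast_zero, hband]
    rw [pv_tog]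
    norm_num
  | succ jj =>
    have hc : ((jj + 1 : Nat) : Int) - 1 = ((jj : Nat) : Int) := by push_cast; ring
    rw [hc, pv_band_one_cast]
    rcases Nat.even_or_odd jj with he | ho
    · have hj : jj % 2 = 0 := Nat.even_iff.mp he
      have hj1 : (jj + 1) % 2 = 1 := by omega
      rw [hj, hj1]
      push_cast
      rw [PySem.Int.bxor_zero]
    · have hj : jj % 2 = 1 := Nat.odd_iff.mp ho
      have hj1 : (jj + 1) % 2 = 0 := by omega
      rw [hj, hj1]
      push_cast
      rw [pv_tog]
      exact (PySem.Int.bxor_zero L).symm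

-- B's whole computation, rewritten through the pure loop
theorem pv_alt_view (n L : Int) (hn : 1 ≤ n) :
    P_list_alt n L =
      Dpure n (pvLev n.toNat)
        (PySem.Int.bxor L (PySem.Int.band ((pvLev n.toNat : Int) - 1) 1)) 0 := by
  have hlen : P_list_alt_len (n.toNat + 1) n 0 = 0 + (pvLev n.toNat : Int) :=
    pv_len_eq _ n 0 hn (by omega)
  have hlev_le : pvLev n.toNat ≤ n.toNat := pvLev_le n.toNat
  show P_list_alt_loop (n.toNat + 1) n (P_list_alt_len (n.toNat + 1) n 0 - 1)
      (PySem.Int.bxor L (PySem.Int.band (P_list_alt_len (n.toNat + 1) n 0 - 1) 1)) 0 = _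
  rw [hlen]
  simp only [zero_add]
  have hk : ((pvLev n.toNat : Int) - 1 + 1).toNat = pvLev n.toNat := by omega
  rw [pv_loop_eq _ n _ _ _ (by omega), hk]

-- the main induction: A = B for 1 ≤ n
theorem pv_main (nn : Nat) :
    ∀ (n L : Int), 1 ≤ n → n.toNat ≤ nn → P_list n L = P_list_alt n L := by
  induction nn with
  | zero => intro n L hn h; omega
  | succ nn' ih =>
    intro n L hn hbound
    by_cases hone : n = 1
    · subst hone
      have hA1 : P_list 1 L = 0 := by simp [P_list, P_list_go]
      have hlev1 : pvLev (1 : Int).toNat = 0 := pvLev_base _ (by norm_num)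
      rw [hA1, pv_alt_view 1 L (by norm_num), hlev1]
      simp [Dpure]
    · have hn2 : 2 ≤ n := by omega
      have hne : (n == 1) = false := by simp [hone]
      have hsh : (n >>> (1 : Nat)).toNat = n.toNat / 2 := pv_toNat_shift n
      have h1' : 1 ≤ n >>> (1 : Nat) := by
        have h : n >>> (1 : Nat) = n / 2 := by simp [Int.shiftRight_eq_div_pow]
        rw [h]; omega
      -- unfold A one step
      have hA : P_list n L =
          PySem.Int.bor (PySem.Int.bor (PySem.Int.band n 1) L)
            ((P_list (n >>> (1 : Nat)) (PySem.Int.bxor L 1)) <<< (1 : Nat)) := by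
        show P_list_go (n.toNat + 1) n L = _
        simp only [P_list_go, hne, Bool.false_eq_true, if_false]
        rw [pv_fuelA n.toNat ((n >>> (1 : Nat)).toNat + 1) _ _ h1' (by omega) (by omega)]
        rfl
      rw [hA, ih (n >>> (1 : Nat)) (PySem.Int.bxor L 1) h1' (by omega)]
      -- rewrite both B's through the pure loop and peel a level
      have hlev : pvLev n.toNat = pvLev (n.toNat / 2) + 1 := pvLev_step _ (by omega)
      rw [pv_alt_view n L hn, pv_alt_view (n >>> (1 : Nat)) (PySem.Int.bxor L 1) h1', hsh, hlev,
          pv_dpure_shift (pvLev (n.toNat / 2))]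
      have hcast : ((pvLev (n.toNat / 2) + 1 : Nat) : Int) - 1
          = ((pvLev (n.toNat / 2) : Nat) : Int) := by push_cast; ring
      rw [hcast, pv_band_one_cast, pv_togpar (pvLev (n.toNat / 2)) L,
          pv_parity_match (pvLev (n.toNat / 2)) L]

-- ===== VERDICT (by name: the statement is the Claim_ definition above) =====
theorem P_list_spec : Claim_equal_P_list := by
  intro my_int is_left _ hpre
  unfold Spec_P_list
  exact pv_main my_int.toNat my_int is_left hpre (le_refl _)
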